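-- pv_equiv track=rewrite | github.com/Leochuanxing/Paritope_Epitope | FrameConstraint.py | Get_consecutive
-- ===== SOURCE A (Python) =====
-- import copy
--
-- def Add(interval, header):
--     res = [header]
--     m = 0
--     while len(res) <= len(interval):
--         res.append(res[-1]+interval[m])
--         m += 1
--     return res
--
-- def Sub_seq(sequence, sub_sequence):
--     boolean = True
--     for i in sub_sequence:
--         if i not in sequence:
--             boolean = False
--             break
--     return boolean
--
-- def Get_consecutive(sequence, length, free_type):
--     sequence.sort()
--     sub_sequence = []
--     if length == 1:
--         for i in sequence:
--             sub_sequence.append([i])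
--     else:
--         # General the distance between two numbers, such that
--         # the distance is no larger than the free_type
--         interval = []
--         for i in range(free_type+1):
--             interval.append([i+1])
--         while len(interval[0]) + 1 <length:
--             longer_interval = []
--             for inter in interval:
--                 for j in range(free_type+1):
--                     longer_inter = copy.deepcopy(inter)
--                     longer_inter.append(j+1)
--                     longer_interval.append(longer_inter)
--             interval = longer_interval
--         # Generate the subsequence with the given length and free_type
--         # We don't want to change the input sequence, thus we deep copy it.
--         copy_sequence = copy.deepcopy(sequence)
--         while len(copy_sequence) >= length:
--             temp_sub_sequence = []
--             for i in interval:
--                 temp_sub_sequence = Add(i, copy_sequence[0])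
--                 if Sub_seq(copy_sequence, temp_sub_sequence):
--                     if temp_sub_sequence not in sub_sequence:
--                         sub_sequence.append(temp_sub_sequence)
--             copy_sequence.remove(copy_sequence[0])
--     return sub_sequence
-- ===== SOURCE B (Python) =====
-- def Get_consecutive(sequence, length, free_type):
--     # Same in-place sort of the argument as the original.
--     sequence.sort()
--     if length == 1:
--         return [[i] for i in sequence]
--     members = set(sequence)
--     result = []
--
--     def extend(path):
--         if len(path) == length:
--             if path not in result:
--                 result.append(list(path))
--             return
--         for step in range(1, free_type + 2):
--             nxt = path[-1] + step
--             if nxt in members: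
--                 path.append(nxt)
--                 extend(path)
--                 path.pop()
--
--     for start in sequence[:len(sequence) - length + 1]:
--         extend([start])
--     return result
-- ===== Notes on version B (the rewrite author's own statement) =====
-- stated objective: alternative
-- what changed: For length>=2, B replaces A's precomputed (free_type+1)^(length-1) step-vector table, per-suffix cumulative sums and O(n) list-membership scans by a single pass over the admissible start positions with an incremental depth-first build-and-prune against a hash set of the elements.
import Mathlib
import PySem

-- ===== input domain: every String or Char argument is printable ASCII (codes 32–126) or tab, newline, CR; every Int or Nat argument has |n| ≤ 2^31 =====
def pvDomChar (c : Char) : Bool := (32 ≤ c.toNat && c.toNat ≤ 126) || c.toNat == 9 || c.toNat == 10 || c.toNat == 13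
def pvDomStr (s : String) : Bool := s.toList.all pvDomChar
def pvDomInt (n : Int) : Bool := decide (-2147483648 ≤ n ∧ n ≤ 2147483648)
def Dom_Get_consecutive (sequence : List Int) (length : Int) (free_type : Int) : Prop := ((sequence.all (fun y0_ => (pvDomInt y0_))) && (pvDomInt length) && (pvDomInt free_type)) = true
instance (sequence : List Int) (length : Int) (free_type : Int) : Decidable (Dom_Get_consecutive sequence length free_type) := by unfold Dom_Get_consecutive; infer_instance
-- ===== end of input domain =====

-- B replaces A's exponential step-table + full-suffix membership scans by a pruned DFS over a hash set
-- (return-value equivalence; both Pythons sort the argument in place).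

-- ===== PORT A =====
-- Add(interval, header): res = [header]; appends res[-1] + interval[m] once per element of interval.
def pvAddAux (last : Int) (interval : List Int) : List Int :=
  match interval with
  | [] => []
  | d :: rest => (last + d) :: pvAddAux (last + d) rest

def pvAdd (interval : List Int) (header : Int) : List Int :=
  header :: pvAddAux header interval

-- Sub_seq: loop with early break; value-equal to List.all in the same order.
def pvSubSeq (sequence sub_sequence : List Int) : Bool :=
  sub_sequence.all (fun i => decide (i ∈ sequence))

-- one pass of the 'while len(interval[0]) + 1 < length' body
def pvExtendTable (free_type : Int) (interval : List (List Int)) : List (List Int) :=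
  interval.foldl (fun longer inter =>
    (PySem.List.pyRange 0 (free_type + 1) 1).foldl
      (fun longer j => longer ++ [inter ++ [j + 1]]) longer) []

-- the table loop runs (length-2) times: interval[0] has 1 element initially and gains one per pass
def pvIntervalTable (length free_type : Int) : List (List Int) :=
  Nat.rec ((PySem.List.pyRange 0 (free_type + 1) 1).map (fun i => [i + 1]))
    (fun _ acc => pvExtendTable free_type acc) (length - 2).toNat

-- body of the inner 'for i in interval' loop over one suffix copy_sequence = cs (head h = copy_sequence[0])
def pvInnerA (interval : List (List Int)) (cs : List Int) (h : Int) (acc : List (List Int)) : List (List Int) :=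
  interval.foldl (fun acc i =>
    let t := pvAdd i h
    if pvSubSeq cs t then (if t ∈ acc then acc else acc ++ [t]) else acc) acc

-- 'while len(copy_sequence) >= length': remove(copy_sequence[0]) drops the head.
-- On [] with the guard true Python raises IndexError (only reachable for length ≤ 0, outside Pre_).
def pvMainA (length : Int) (interval : List (List Int)) : List Int → List (List Int) → List (List Int)
  | [], acc => acc
  | h :: t, acc =>
    if length ≤ (t.length : Int) + 1 then
      pvMainA length interval t (pvInnerA interval (h :: t) h acc)
    else acc

def Get_consecutive (sequence : List Int) (length : Int) (free_type : Int) : List (List Int) :=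
  let s := PySem.List.sorted sequence (fun x => x) false
  if length = 1 then s.foldl (fun acc i => acc ++ [[i]]) []
  else pvMainA length (pvIntervalTable length free_type) s []

-- ===== PORT B =====
-- extend(path): DFS; at len(path) == length dedup-append, else try steps 1..free_type+1 and prune on
-- set membership. fuel = length - len(path) is the termination device (path grows by one per level);
-- path is always nonempty ([start] at the root), so path[-1] = getLast?.getD 0.
def pvExtendB (members : List Int) (length free_type : Int) : Nat → List Int → List (List Int) → List (List Int)
  | 0, path, res =>
      if (path.length : Int) = length then (if path ∈ res then res else res ++ [path]) else res
  | k + 1, path, res =>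
      if (path.length : Int) = length then (if path ∈ res then res else res ++ [path])
      else
        (PySem.List.pyRange 1 (free_type + 2) 1).foldl (fun res step =>
          let nxt := (path.getLast?.getD 0) + step
          if nxt ∈ members then pvExtendB members length free_type k (path ++ [nxt]) res else res) res

def Get_consecutive_alt (sequence : List Int) (length : Int) (free_type : Int) : List (List Int) :=
  let s := PySem.List.sorted sequence (fun x => x) false
  if length = 1 then s.map (fun i => [i])
  else
    let members := PySem.Set.ofList s
    (PySem.List.slice s none (some ((s.length : Int) - length + 1))).foldl
      (fun res start => pvExtendB members length free_type (length - 1).toNat [start] res) []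

-- ===== PRECONDITION & SPEC =====
-- Pre_ excludes exactly the inputs where Python A raises: length ≤ 0 (IndexError on the emptied
-- copy_sequence) and length ≥ 2 with free_type < 0 (IndexError on interval[0]).
def Pre_Get_consecutive (sequence : List Int) (length : Int) (free_type : Int) : Prop :=
  1 ≤ length ∧ (length = 1 ∨ 0 ≤ free_type)
instance (sequence : List Int) (length : Int) (free_type : Int) : Decidable (Pre_Get_consecutive sequence length free_type) := by unfold Pre_Get_consecutive; infer_instance

def pvWitness_Get_consecutive : List Int × Int × Int := ([1, 2, 4], 2, 1)

def Spec_Get_consecutive (sequence : List Int) (length : Int) (free_type : Int) (out : List (List Int)) : Prop := out = Get_consecutive_alt sequence length free_type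
instance (sequence : List Int) (length : Int) (free_type : Int) (out : List (List Int)) : Decidable (Spec_Get_consecutive sequence length free_type out) := by unfold Spec_Get_consecutive; infer_instance

-- ===== CLAIM (what is proved, stated in full; the proofs are below) =====
def Claim_equal_Get_consecutive : Prop := ∀ (sequence : List Int) (length : Int) (free_type : Int), Dom_Get_consecutive sequence length free_type → Pre_Get_consecutive sequence length free_type → Spec_Get_consecutive sequence length free_type (Get_consecutive sequence length free_type)

-- ===== LEMMAS AND PROOFS =====

-- canonical lexicographic list of step vectors of a given arity, front-extension form
def pvVecs (f : Int) : Nat → List (List Int)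
  | 0 => [[]]
  | k + 1 => (PySem.List.pyRange 1 (f + 2) 1).flatMap (fun s => (pvVecs f k).map (fun v => s :: v))

theorem pvFlatMap_single {α β : Type} (l : List α) (g : α → β) :
    l.flatMap (fun s => [g s]) = l.map g := by
  induction l with
  | nil => rfl
  | cons a l ih => simp [List.flatMap_cons, ih]

theorem pvFoldl_id {α β : Type} (l : List α) (a : β) : l.foldl (fun a _ => a) a = a := by
  induction l <;> simp [*]

theorem pvFoldl_flatMap {α β γ : Type} (l : List α) (h : α → List β) (g : γ → β → γ) (init : γ) :
    (l.flatMap h).foldl g init = l.foldl (fun acc x => (h x).foldl g acc) init := by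
  induction l generalizing init with
  | nil => rfl
  | cons a l ih => simp [List.flatMap_cons, List.foldl_append, ih]

theorem pvAll_congr {α : Type} (l : List α) (p q : α → Bool) (h : ∀ x ∈ l, p x = q x) :
    l.all p = l.all q := by
  induction l with
  | nil => rfl
  | cons a t ih => simp [List.all_cons, h a (by simp), ih (fun x hx => h x (by simp [hx]))]

theorem pvVecs_snoc (f : Int) (k : Nat) :
    pvVecs f (k + 1) =
      (pvVecs f k).flatMap (fun v => (PySem.List.pyRange 1 (f + 2) 1).map (fun s => v ++ [s])) := by
  induction k with
  | zero =>
    simp [pvVecs]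
    exact pvFlatMap_single _ _
  | succ k ih =>
    conv_lhs => rw [pvVecs, ih]
    rw [pvVecs]
    simp [List.map_flatMap, List.flatMap_map, List.flatMap_assoc, Function.comp_def]

theorem pvRange_shift {β : Type} (f : Int) (h : Int → β) :
    (PySem.List.pyRange 0 (f + 1) 1).map (fun j => h (j + 1)) = (PySem.List.pyRange 1 (f + 2) 1).map h := by
  rw [PySem.List.pyRange_one, PySem.List.pyRange_one]
  have e : f + 2 - 1 = f + 1 - 0 := by ring
  rw [e]
  simp [List.map_map, Function.comp_def]
  intro a _
  rw [Int.add_comm]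

theorem pvExtendTable_vecs (f : Int) (k : Nat) :
    pvExtendTable f (pvVecs f k) = pvVecs f (k + 1) := by
  rw [pvVecs_snoc, pvExtendTable]
  have inner : ∀ (longer : List (List Int)) (inter : List Int),
      (PySem.List.pyRange 0 (f + 1) 1).foldl (fun l j => l ++ [inter ++ [j + 1]]) longer
        = longer ++ (PySem.List.pyRange 1 (f + 2) 1).map (fun s => inter ++ [s]) := by
    intro longer inter
    rw [PySem.List.foldl_append_singleton_eq_map]
    rw [pvRange_shift f (fun s => inter ++ [s])]
  calc (pvVecs f k).foldl (fun longer inter =>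
        (PySem.List.pyRange 0 (f + 1) 1).foldl (fun l j => l ++ [inter ++ [j + 1]]) longer) []
      = (pvVecs f k).foldl (fun longer inter =>
        longer ++ (PySem.List.pyRange 1 (f + 2) 1).map (fun s => inter ++ [s])) [] := by
        exact PySem.List.foldl_congr_mem _ _ _ _ (fun acc x _ => inner acc x)
    _ = [] ++ (pvVecs f k).flatMap (fun v => (PySem.List.pyRange 1 (f + 2) 1).map (fun s => v ++ [s])) := by
        exact PySem.List.foldl_append_eq_flatMap _ _ _
    _ = _ := by simp

theorem pvTable_eq (length free_type : Int) (h2 : 2 ≤ length) :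
    pvIntervalTable length free_type = pvVecs free_type (length - 1).toNat := by
  have init : (PySem.List.pyRange 0 (free_type + 1) 1).map (fun i => [i + 1]) = pvVecs free_type 1 := by
    rw [pvVecs]
    show _ = (PySem.List.pyRange 1 (free_type + 2) 1).flatMap (fun s => [[s]])
    rw [pvFlatMap_single]
    exact pvRange_shift free_type (fun s => [s])
  have iter : ∀ n : Nat, (Nat.rec ((PySem.List.pyRange 0 (free_type + 1) 1).map (fun i => [i + 1]))
      (fun _ acc => pvExtendTable free_type acc) n : List (List Int)) = pvVecs free_type (n + 1) := by
    intro n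
    induction n with
    | zero => exact init
    | succ n ih => simpa [ih] using pvExtendTable_vecs free_type (n + 1)
  have e : (length - 1).toNat = (length - 2).toNat + 1 := by omega
  rw [pvIntervalTable, iter, e]

theorem pvVecs_steps_pos (f : Int) (k : Nat) :
    ∀ v ∈ pvVecs f k, ∀ s ∈ v, 1 ≤ s := by
  induction k with
  | zero => intro v hv; simp [pvVecs] at hv; simp [hv]
  | succ k ih =>
    intro v hv s hs
    simp only [pvVecs, List.mem_flatMap, List.mem_map] at hv
    obtain ⟨a, ha, w, hw, rfl⟩ := hv
    rcases List.mem_cons.mp hs with rfl | hs'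
    · exact (PySem.List.mem_pyRange_one.mp ha).1
    · exact ih w hw s hs'

theorem pvAddAux_gt (v : List Int) : ∀ (h : Int), (∀ s ∈ v, 1 ≤ s) → ∀ x ∈ pvAddAux h v, h < x := by
  induction v with
  | nil => intro h _ x hx; simp [pvAddAux] at hx
  | cons d rest ih =>
    intro h hpos x hx
    have hd : 1 ≤ d := hpos d (by simp)
    rcases List.mem_cons.mp hx with rfl | hx'
    · omega
    · have := ih (h + d) (fun s hs => hpos s (by simp [hs])) x hx'
      omega

theorem pvExtendB_spec (members : List Int) (L f : Int) (k : Nat) :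
    ∀ (path : List Int) (res : List (List Int)), (path.length : Int) + k = L →
      pvExtendB members L f k path res =
        (pvVecs f k).foldl (fun res v =>
          if (pvAddAux (path.getLast?.getD 0) v).all (fun x => decide (x ∈ members)) then
            (if path ++ pvAddAux (path.getLast?.getD 0) v ∈ res then res
             else res ++ [path ++ pvAddAux (path.getLast?.getD 0) v])
          else res) res := by
  induction k with
  | zero =>
    intro path res hinv
    rw [pvExtendB, if_pos (by omega)]
    simp [pvVecs, pvAddAux]
  | succ k ih =>
    intro path res hinv
    rw [pvExtendB, if_neg (by omega), pvVecs, pvFoldl_flatMap]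
    apply PySem.List.foldl_congr_mem
    intro acc s _
    rw [List.foldl_map]
    by_cases hmem : (path.getLast?.getD 0) + s ∈ members
    · simp only [hmem, if_pos]
      rw [ih _ _ (by simp; omega)]
      apply PySem.List.foldl_congr_mem
      intro acc2 v _
      have hl : ((path ++ [path.getLast?.getD 0 + s]).getLast?.getD 0) = path.getLast?.getD 0 + s := by
        simp
      rw [hl]
      simp only [pvAddAux, List.all_cons, hmem, decide_true, Bool.true_and, List.append_assoc,
        List.singleton_append]
    · simp only [hmem, ite_false]
      have hid : ∀ (acc2 : List (List Int)), ∀ v ∈ pvVecs f k,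
          (fun res v =>
            if (pvAddAux (path.getLast?.getD 0) (s :: v)).all (fun x => decide (x ∈ members)) then
              (if path ++ pvAddAux (path.getLast?.getD 0) (s :: v) ∈ res then res
               else res ++ [path ++ pvAddAux (path.getLast?.getD 0) (s :: v)])
            else res) acc2 v = acc2 := by
        intro acc2 v _
        simp [pvAddAux, hmem]
      rw [PySem.List.foldl_congr_mem _ _ (fun a _ => a) _ hid, pvFoldl_id]

theorem pvMem_suffix (S pre t : List Int) (h x : Int)
    (hS : S.Pairwise (· ≤ ·)) (hsplit : pre ++ (h :: t) = S) (hx : h < x) :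
    (x ∈ S) ↔ (x ∈ h :: t) := by
  subst hsplit
  constructor
  · intro hxS
    rcases List.mem_append.mp hxS with hp | hht
    · have := (List.pairwise_append.mp hS).2.2 x hp h (by simp)
      omega
    · exact hht
  · intro hht
    exact List.mem_append_right _ hht

theorem pvInner_eq (S pre t : List Int) (h : Int) (L f : Int)
    (hS : S.Pairwise (· ≤ ·)) (hsplit : pre ++ (h :: t) = S) (h2 : 2 ≤ L) :
    ∀ res, pvInnerA (pvIntervalTable L f) (h :: t) h res =
      pvExtendB (PySem.Set.ofList S) L f (L - 1).toNat [h] res := by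
  intro res
  rw [pvExtendB_spec _ L f _ _ _ (by simp; omega), pvTable_eq L f h2, pvInnerA]
  apply PySem.List.foldl_congr_mem
  intro acc v hv
  have hlast : (([h] : List Int).getLast?.getD 0) = h := by simp
  rw [hlast]
  have hcond : pvSubSeq (h :: t) (h :: pvAddAux h v)
      = (pvAddAux h v).all (fun x => decide (x ∈ PySem.Set.ofList S)) := by
    rw [pvSubSeq]
    simp only [List.all_cons, List.mem_cons, true_or, decide_true, Bool.true_and]
    apply pvAll_congr
    intro x hxv
    have hgt : h < x := pvAddAux_gt v h (pvVecs_steps_pos f _ v hv) x hxv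
    have hiff : (x ∈ h :: t) ↔ (x ∈ PySem.Set.ofList S) := by
      rw [← pvMem_suffix S pre t h x hS hsplit hgt, PySem.Set.mem_ofList]
    exact decide_eq_decide.mpr ((List.mem_cons).symm.trans hiff)
  simp only [pvAdd, List.singleton_append, hcond]

theorem pvMain_eq (S : List Int) (L f : Int) (hS : S.Pairwise (· ≤ ·)) (h2 : 2 ≤ L) :
    ∀ (cs : List Int) (pre : List Int), pre ++ cs = S → ∀ res,
      pvMainA L (pvIntervalTable L f) cs res =
        (cs.take ((cs.length : Int) - L + 1).toNat).foldl
          (fun res h => pvExtendB (PySem.Set.ofList S) L f (L - 1).toNat [h] res) res := by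
  intro cs
  induction cs with
  | nil => intro pre hpre res; simp [pvMainA]
  | cons h t ih =>
    intro pre hpre res
    rw [pvMainA]
    by_cases hg : L ≤ (t.length : Int) + 1
    · rw [if_pos hg]
      rw [ih (pre ++ [h]) (by simpa using hpre) _]
      rw [pvInner_eq S pre t h L f hS hpre h2]
      have e : (((h :: t).length : Int) - L + 1).toNat = ((t.length : Int) - L + 1).toNat + 1 := by
        simp only [List.length_cons]
        omega
      rw [e, List.take_succ_cons, List.foldl_cons]
    · rw [if_neg hg]
      have e : (((h :: t).length : Int) - L + 1).toNat = 0 := by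
        simp only [List.length_cons]
        omega
      rw [e, List.take_zero, List.foldl_nil]

theorem pvFilter_mono {α : Type} (l : List α) (p q : α → Bool) (h : ∀ x, p x = true → q x = true) :
    (l.filter p).length ≤ (l.filter q).length := by
  induction l with
  | nil => simp
  | cons a t ih =>
    simp only [List.filter_cons]
    by_cases hp : p a = true
    · rw [if_pos hp, if_pos (h a hp)]
      simp only [List.length_cons]
      omega
    · rw [if_neg hp]
      split
      · simp only [List.length_cons]; omega
      · omega

theorem pvFilter_lt (members : List Int) (a b : Int) (hab : a < b) (hb : b ∈ members) :
    (members.filter (fun x => decide (b < x))).length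
      < (members.filter (fun x => decide (a < x))).length := by
  induction members with
  | nil => cases hb
  | cons m rest ih =>
    simp only [List.filter_cons]
    simp only [decide_eq_true_eq]
    by_cases hbm : b = m
    · subst hbm
      have hmono := pvFilter_mono rest (fun x => decide (b < x)) (fun x => decide (a < x))
        (fun x hx => by simp at hx ⊢; omega)
      rw [if_neg (lt_irrefl b), if_pos hab]
      simp only [List.length_cons]
      omega
    · have hb' : b ∈ rest := by
        rcases List.mem_cons.mp hb with h' | h'
        · exact absurd h' hbm
        · exact h'
      have := ih hb'
      by_cases h1 : b < m
      · rw [if_pos h1, if_pos (by omega : a < m)]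
        simp only [List.length_cons]
        omega
      · rw [if_neg h1]
        split
        · simp only [List.length_cons]; omega
        · omega

theorem pvExtendB_nil (members : List Int) (L f : Int) :
    ∀ (k : Nat) (path : List Int) (res : List (List Int)), (path.length : Int) + k = L →
      (members.filter (fun x => decide (path.getLast?.getD 0 < x))).length < k →
      pvExtendB members L f k path res = res := by
  intro k
  induction k with
  | zero => intro path res _ hk; exact absurd hk (Nat.not_lt_zero _)
  | succ k ih =>
    intro path res hinv hk
    rw [pvExtendB, if_neg (by omega)]
    have hid : ∀ (acc : List (List Int)), ∀ s ∈ PySem.List.pyRange 1 (f + 2) 1,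
        (fun res step =>
          let nxt := (path.getLast?.getD 0) + step
          if nxt ∈ members then pvExtendB members L f k (path ++ [nxt]) res else res) acc s = acc := by
      intro acc s hs
      have hs1 : 1 ≤ s := (PySem.List.mem_pyRange_one.mp hs).1
      by_cases hmem : (path.getLast?.getD 0) + s ∈ members
      · simp only [hmem, if_pos]
        apply ih _ _ (by simp; omega)
        have hlast : ((path ++ [path.getLast?.getD 0 + s]).getLast?.getD 0)
            = path.getLast?.getD 0 + s := by simp
        rw [hlast]
        have := pvFilter_lt members (path.getLast?.getD 0) (path.getLast?.getD 0 + s)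
          (by omega) hmem
        omega
      · simp [hmem]
    rw [PySem.List.foldl_congr_mem _ _ (fun a _ => a) _ hid, pvFoldl_id]

theorem pvOfList_len_le (xs : List Int) : (PySem.Set.ofList xs).length ≤ xs.length := by
  have aux : ∀ (l : List Int) (acc : PySem.Set Int),
      (List.foldl PySem.Set.add acc l).length ≤ acc.length + l.length := by
    intro l
    induction l with
    | nil => intro acc; simp
    | cons a t ih =>
      intro acc
      have h := ih (PySem.Set.add acc a)
      have : (PySem.Set.add acc a).length ≤ acc.length + 1 := by
        rw [PySem.Set.add]
        split <;> simp
      simp only [List.foldl_cons, List.length_cons]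
      omega
  simpa [PySem.Set.ofList, PySem.Set.empty] using aux xs PySem.Set.empty

-- ===== VERDICT (by name: the statement is the Claim_ definition above) =====
theorem Get_consecutive_spec : Claim_equal_Get_consecutive := by
  intro sequence length free_type _ hpre
  obtain ⟨h1, hor⟩ := hpre
  unfold Spec_Get_consecutive Get_consecutive Get_consecutive_alt
  by_cases hL1 : length = 1
  · simp only [hL1, if_pos]
    rw [PySem.List.foldl_append_singleton_eq_map]
    simp
  · have h2 : 2 ≤ length := by omega
    have hf : 0 ≤ free_type := by
      rcases hor with h | h
      · exact absurd h hL1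
      · exact h
    simp only [hL1, ite_false]
    set S := PySem.List.sorted sequence (fun x => x) false with hSdef
    have hS : S.Pairwise (· ≤ ·) := PySem.List.sorted_pairwise sequence (fun x => x)
    rw [pvMain_eq S length free_type hS h2 S [] rfl []]
    by_cases hb : 0 ≤ (S.length : Int) - length + 1
    · rw [PySem.List.slice_to _ hb]
    · have e0 : ((S.length : Int) - length + 1).toNat = 0 := by omega
      rw [e0, List.take_zero, List.foldl_nil]
      have hid : ∀ (acc : List (List Int)), ∀ h ∈ PySem.List.slice S none (some ((S.length : Int) - length + 1)),
          (fun res start => pvExtendB (PySem.Set.ofList S) length free_type (length - 1).toNat [start] res) acc h = acc := by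
        intro acc h _
        apply pvExtendB_nil _ _ _ _ _ _ (by simp; omega)
        have hlen : ((PySem.Set.ofList S).filter (fun x => decide (([h] : List Int).getLast?.getD 0 < x))).length
            ≤ S.length := le_trans (List.length_filter_le _ _) (pvOfList_len_le S)
        omega
      rw [PySem.List.foldl_congr_mem _ _ (fun a _ => a) _ hid, pvFoldl_id]
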